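-- pv_equiv track=rewrite | github.com/fb-pikpok/Cluster_Analysis | helper/cluster_naming.py | compute_top_words_per_cluster
-- ===== SOURCE A (Python) =====
-- from collections import Counter
--
-- def compute_top_words_per_cluster(aggregated_text, top_n=10):
--     """
--     Computes the top N most used words for each cluster.
--
--     Args:
--         aggregated_text (dict): Mapping of cluster ID to aggregated text.
--         top_n (int): Number of top words to compute.
--
--     Returns:
--         dict: Mapping of cluster ID to list of top words.
--     """
--     cluster_top_words = {}
--     for cluster_id, text in aggregated_text.items():
--         words = text.split()
--         word_counts = Counter(words)
--         top_words = [word for word, _ in word_counts.most_common(top_n)]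
--         cluster_top_words[cluster_id] = top_words
--     return cluster_top_words
-- ===== SOURCE B (Python) =====
-- from collections import Counter
--
-- def compute_top_words_per_cluster(aggregated_text, top_n=10):
--     """Top-N words per cluster by repeated max-extraction (selection) instead of
--     a heap/sort-based most_common: pull the first maximal-count pair, remove it,
--     repeat up to top_n times."""
--     cluster_top_words = {}
--     for cluster_id, text in aggregated_text.items():
--         remaining = list(Counter(text.split()).items())
--         top_words = []
--         k = top_n
--         while k > 0 and remaining:
--             best = max(remaining, key=lambda kv: kv[1])
--             remaining.remove(best)
--             top_words.append(best[0])
--             k -= 1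
--         cluster_top_words[cluster_id] = top_words
--     return cluster_top_words
-- ===== Notes on version B (the rewrite author's own statement) =====
-- stated objective: alternative
-- what changed: Replaces Counter.most_common's sort/heap-based top-N with selection by repeated max-extraction: scan the remaining (word,count) pairs for the first pair of maximal count, remove it, and repeat up to top_n times.
import Mathlib
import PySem

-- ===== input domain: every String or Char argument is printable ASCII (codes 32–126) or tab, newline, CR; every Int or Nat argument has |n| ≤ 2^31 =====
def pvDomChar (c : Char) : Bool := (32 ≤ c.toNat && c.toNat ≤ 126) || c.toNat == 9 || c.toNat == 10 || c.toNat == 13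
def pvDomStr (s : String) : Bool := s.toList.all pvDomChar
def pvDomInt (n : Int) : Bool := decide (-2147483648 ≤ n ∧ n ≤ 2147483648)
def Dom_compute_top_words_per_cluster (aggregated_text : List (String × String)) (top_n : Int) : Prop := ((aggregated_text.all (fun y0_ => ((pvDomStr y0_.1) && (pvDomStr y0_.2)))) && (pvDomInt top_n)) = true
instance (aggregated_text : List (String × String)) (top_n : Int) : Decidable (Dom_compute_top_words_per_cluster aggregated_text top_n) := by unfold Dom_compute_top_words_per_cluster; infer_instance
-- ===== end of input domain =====

-- B replaces Counter.most_common's sort/heap-based top-N with selection by repeated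
-- max-extraction (first maximal pair, remove, repeat); objective: alternative algorithm.

-- ===== PORT A =====
-- A's dict parameter arrives as an association list; Python iterates the dict, so the
-- port iterates (Dict.ofList …).items (dict(pairs): later values overwrite, position of first occurrence).
-- Counter.most_common(n) is ported as its documented meaning: stable sort by count
-- descending, first n elements (n ≤ 0 gives [], matched by Int.toNat).
def compute_top_words_per_cluster (aggregated_text : List (String × String)) (top_n : Int) : List (String × List String) :=
  ((PySem.Dict.ofList aggregated_text).items.foldl
    (fun (acc : PySem.Dict String (List String)) p =>
      let words := PySem.Str.split₀ p.2
      let word_counts := PySem.Dict.counter words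
      let top_words :=
        ((PySem.List.sorted word_counts.items (fun kv => kv.2) true).take top_n.toNat).map (·.1)
      acc.insert p.1 top_words)
    PySem.Dict.empty).items

-- ===== PORT B =====
-- B's selection loop: 'while k > 0 and remaining: best = max(remaining, key=count);
-- remaining.remove(best); top.append(best[0])'.  max(…, key=…) is PySem.List.max?
-- (first extremal element); 'remaining.remove(best)' is List.erase (exact here:
-- best ∈ remaining by max?_mem, so remove() removes best's first occurrence and
-- never raises); the loop exits when remaining is empty, i.e. max? = none.
theorem pv_erase_lt {l : List (String × Int)} {b : String × Int}
    (h : PySem.List.max? l (fun kv => kv.2) = some b) : (l.erase b).length < l.length := by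
  have hb := PySem.List.max?_mem h
  rw [List.length_erase_of_mem hb]
  exact Nat.sub_lt (List.length_pos_of_mem hb) one_pos

def pvSelectLoop (rem : List (String × Int)) (k : Int) : List String :=
  if 0 < k then
    match h : PySem.List.max? rem (fun kv => kv.2) with
    | none => []
    | some best => best.1 :: pvSelectLoop (rem.erase best) (k - 1)
  else []
termination_by rem.length
decreasing_by exact pv_erase_lt h

def compute_top_words_per_cluster_alt (aggregated_text : List (String × String)) (top_n : Int) : List (String × List String) :=
  ((PySem.Dict.ofList aggregated_text).items.foldl
    (fun (res : PySem.Dict String (List String)) p =>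
      let remaining := (PySem.Dict.counter (PySem.Str.split₀ p.2)).items
      res.insert p.1 (pvSelectLoop remaining top_n))
    PySem.Dict.empty).items

-- ===== PRECONDITION & SPEC =====
def Spec_compute_top_words_per_cluster (aggregated_text : List (String × String)) (top_n : Int) (out : List (String × List String)) : Prop := out = compute_top_words_per_cluster_alt aggregated_text top_n
instance (aggregated_text : List (String × String)) (top_n : Int) (out : List (String × List String)) : Decidable (Spec_compute_top_words_per_cluster aggregated_text top_n out) := by unfold Spec_compute_top_words_per_cluster; infer_instance

-- ===== CLAIM (what is proved, stated in full; the proofs are below) =====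
def Claim_equal_compute_top_words_per_cluster : Prop := ∀ (aggregated_text : List (String × String)) (top_n : Int), Dom_compute_top_words_per_cluster aggregated_text top_n → Spec_compute_top_words_per_cluster aggregated_text top_n (compute_top_words_per_cluster aggregated_text top_n)

-- ===== LEMMAS AND PROOFS =====

-- Descending stable insertion (what PySem.List.sorted … true folds with).
def pvIns {α : Type} (key : α → Int) (x : α) (s : List α) : List α :=
  PySem.List.insertBy (fun a b => decide (key b < key a)) x s

-- Insert x in front of all its ties (x is the EARLIEST element, so among equal
-- keys it must end up first).
def pvInsF {α : Type} (key : α → Int) (x : α) (s : List α) : List α :=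
  PySem.List.insertBy (fun a b => decide (key b ≤ key a)) x s

-- Running first-max starting from a.
def pvMaxFrom {α : Type} (key : α → Int) (a : α) (t : List α) : α :=
  t.foldl (fun m x => if key m < key x then x else m) a

theorem pv_ins_insF_comm {α : Type} (key : α → Int) (y x : α) (s : List α) :
    pvIns key y (pvInsF key x s) = pvInsF key x (pvIns key y s) := by
  induction s with
  | nil =>
    simp only [pvIns, pvInsF, PySem.List.insertBy]
    split_ifs with h1 h2 h3 <;> (simp_all; try omega)
  | cons z s' ih =>
    simp only [pvIns, pvInsF, PySem.List.insertBy] at *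
    split_ifs with h1 h2 h3 <;>
      (simp_all [PySem.List.insertBy]; split_ifs <;> simp_all <;> omega)

theorem pv_foldl_ins_insF {α : Type} (key : α → Int) (t : List α) (s : List α) (x : α) :
    t.foldl (fun acc z => pvIns key z acc) (pvInsF key x s)
      = pvInsF key x (t.foldl (fun acc z => pvIns key z acc) s) := by
  induction t generalizing s with
  | nil => rfl
  | cons z t' ih => simp only [List.foldl_cons, pv_ins_insF_comm, ih]

-- Stable descending sort of x :: t = insert x (the earliest element) in front of
-- its ties in the sorted tail.
theorem pv_sorted_cons {α : Type} (key : α → Int) (x : α) (t : List α) :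
    PySem.List.sorted (x :: t) key true = pvInsF key x (PySem.List.sorted t key true) := by
  rw [PySem.List.sorted_rev_eq_foldl_insertBy, PySem.List.sorted_rev_eq_foldl_insertBy]
  have : PySem.List.insertBy (fun a b => decide (key b < key a)) x ([] : List α)
      = pvInsF key x [] := rfl
  simpa [List.foldl_cons, this] using pv_foldl_ins_insF key t [] x

theorem pv_max?_cons {α : Type} (key : α → Int) (x : α) (t : List α) :
    PySem.List.max? (x :: t) key = some (pvMaxFrom key x t) := by
  have aux : ∀ (t : List α) (a : α),
      t.foldl (fun acc y => match acc with
        | none => some y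
        | some m => if key m < key y then some y else some m) (some a)
        = some (pvMaxFrom key a t) := by
    intro t
    induction t with
    | nil => intro a; rfl
    | cons z t' ih =>
      intro a
      simp only [List.foldl_cons, pvMaxFrom] at *
      by_cases h : key a < key z <;> simp [h, ih]
  simpa [PySem.List.max?] using aux t x

theorem pv_maxFrom_of_all_le {α : Type} (key : α → Int) (x : α) (t : List α)
    (h : ∀ y ∈ t, key y ≤ key x) : pvMaxFrom key x t = x := by
  induction t with
  | nil => rfl
  | cons z t' ih =>
    have hz : ¬ key x < key z := by have := h z (by simp); omega
    simp only [pvMaxFrom, List.foldl_cons, if_neg hz]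
    exact ih (fun y hy => h y (by simp [hy]))

theorem pv_maxFrom_switch {α : Type} (key : α → Int) (t : List α) :
    ∀ (a a' : α), key a' ≤ key a → key a < key (pvMaxFrom key a' t) →
      pvMaxFrom key a t = pvMaxFrom key a' t := by
  induction t with
  | nil => intro a a' h1 h2; simp [pvMaxFrom] at h2; omega
  | cons z t' ih =>
    intro a a' h1 h2
    simp only [pvMaxFrom, List.foldl_cons] at *
    by_cases hz : key a' < key z
    · rw [if_pos hz] at h2
      by_cases hz2 : key a < key z
      · rw [if_pos hz2, if_pos hz]
      · rw [if_neg hz2, if_pos hz]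
        exact ih a z (by omega) h2
    · rw [if_neg hz] at h2
      have hz2 : ¬ key a < key z := by omega
      rw [if_neg hz2, if_neg hz]
      exact ih a a' h1 h2

-- Pulling the FIRST maximal element off the front of the stable descending sort.
theorem pv_popMax {α : Type} [BEq α] [LawfulBEq α] (key : α → Int) :
    ∀ (l : List α) (m : α), PySem.List.max? l key = some m →
      PySem.List.sorted l key true = m :: PySem.List.sorted (l.erase m) key true := by
  intro l
  induction l with
  | nil => intro m h; simp [PySem.List.max?] at h
  | cons x t ih =>
    intro m h
    rw [pv_max?_cons] at h
    injection h with h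
    by_cases hall : ∀ y ∈ t, key y ≤ key x
    · have hm : m = x := by rw [← h]; exact pv_maxFrom_of_all_le key x t hall
      subst hm
      rw [List.erase_cons_head, pv_sorted_cons]
      rcases ht : PySem.List.sorted t key true with _ | ⟨y, s⟩
      · rfl
      · have hy : y ∈ t := by
          have := PySem.List.sorted_perm t key true
          rw [ht] at this
          exact this.mem_iff.mp (by simp)
        simp [pvInsF, PySem.List.insertBy, hall y hy]
    · rw [not_forall] at hall
      simp only [not_forall, not_le, exists_prop] at hall
      obtain ⟨y, hy, hxy⟩ := hall
      rcases t with _ | ⟨y0, t0⟩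
      · simp at hy
      · have hmax : PySem.List.max? (y0 :: t0) key = some (pvMaxFrom key y0 t0) :=
          pv_max?_cons key y0 t0
        have hxm' : key x < key (pvMaxFrom key y0 t0) := by
          have := PySem.List.max?_isMax hmax y hy
          omega
        have hm : m = pvMaxFrom key y0 t0 := by
          rw [← h]
          simp only [pvMaxFrom, List.foldl_cons]
          by_cases hx0 : key x < key y0
          · rw [if_pos hx0]
          · rw [if_neg hx0]
            exact pv_maxFrom_switch key t0 x y0 (by omega) hxm'
        have hne : (x == m) = false := by
          rw [beq_eq_false_iff_ne]
          intro hcontr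
          rw [hm] at hcontr
          rw [← hcontr] at hxm'
          omega
        rw [List.erase_cons, hne, pv_sorted_cons, ih m (by rw [hmax, hm])]
        have hskip : pvInsF key x (m :: PySem.List.sorted ((y0 :: t0).erase m) key true)
            = m :: pvInsF key x (PySem.List.sorted ((y0 :: t0).erase m) key true) := by
          have : ¬ key m ≤ key x := by rw [hm]; omega
          simp [pvInsF, PySem.List.insertBy, this]
        rw [hskip, ← pv_sorted_cons]
        simp

-- The selection loop computes exactly the first top_n words of the stable
-- descending sort.
theorem pv_selectLoop_eq :
    ∀ (n : Nat) (l : List (String × Int)), l.length ≤ n → ∀ (k : Int),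
      pvSelectLoop l k
        = ((PySem.List.sorted l (fun kv => kv.2) true).take k.toNat).map (·.1) := by
  intro n
  induction n with
  | zero =>
    intro l hl k
    have : l = [] := List.eq_nil_of_length_eq_zero (Nat.le_zero.mp hl)
    subst this
    rw [pvSelectLoop]
    simp only [PySem.List.max?, List.foldl_nil]
    split_ifs <;> simp [PySem.List.sorted]
  | succ n ih =>
    intro l hl k
    rw [pvSelectLoop]
    by_cases hk : 0 < k
    · rw [if_pos hk]
      rcases hmax : PySem.List.max? l (fun kv => kv.2) with _ | ⟨b⟩
      · rw [PySem.List.max?_eq_none_iff] at hmax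
        subst hmax
        simp [PySem.List.sorted]
      · show b.1 :: pvSelectLoop (l.erase b) (k - 1) = _
        rw [pv_popMax (fun kv => kv.2) l b hmax]
        have hkt : k.toNat = (k - 1).toNat + 1 := by omega
        rw [hkt, List.take_succ_cons, List.map_cons]
        congr 1
        exact ih (l.erase b) (by have := pv_erase_lt hmax; omega) (k - 1)
    · rw [if_neg hk]
      have : k.toNat = 0 := by omega
      simp [this]

-- The per-cluster step functions of the two folds agree.
theorem pv_step_eq (top_n : Int) (acc : PySem.Dict String (List String)) (p : String × String) :
    acc.insert p.1
      (((PySem.List.sorted (PySem.Dict.counter (PySem.Str.split₀ p.2)).items (fun kv => kv.2) true).take top_n.toNat).map (·.1))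
    = acc.insert p.1
      (pvSelectLoop (PySem.Dict.counter (PySem.Str.split₀ p.2)).items top_n) := by
  rw [pv_selectLoop_eq (PySem.Dict.counter (PySem.Str.split₀ p.2)).items.length _ le_rfl top_n]

-- ===== VERDICT (by name: the statement is the Claim_ definition above) =====
theorem compute_top_words_per_cluster_spec : Claim_equal_compute_top_words_per_cluster := by
  intro aggregated_text top_n _
  unfold Spec_compute_top_words_per_cluster
  unfold compute_top_words_per_cluster compute_top_words_per_cluster_alt
  simp only []
  congr 1
  apply PySem.List.foldl_congr_mem
  intro acc p _
  exact pv_step_eq top_n acc p
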